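-- pv_equiv track=rewrite | github.com/GundalaNikhil/DSA | dsa-problems/Strings/solutions/STR-003-smallest-missing-substring.py | smallest_missing_substring
-- ===== SOURCE A (Python) =====
-- def smallest_missing_substring(s: str, k: int) -> str:
--     # Extract all k-length substrings
--     substrings = set()
--     for i in range(len(s) - k + 1):
--         substrings.add(s[i:i+k])
--
--     def dfs(current: str, remaining: int) -> str:
--         if remaining == 0:
--             return current if current not in substrings else None
--
--         for c in 'abcdefghijklmnopqrstuvwxyz':
--             result = dfs(current + c, remaining - 1)
--             if result is not None:
--                 return result
--
--         return None
--
--     result = dfs("", k)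
--     return result if result else ""
-- ===== SOURCE B (Python) =====
-- def smallest_missing_substring(s: str, k: int) -> str:
--     # All k-length substrings of s.
--     subs = {s[i:i+k] for i in range(len(s) - k + 1)}
--     # Enumerate length-k candidates in lexicographic order as base-26 numbers;
--     # return the first one that is not a substring.
--     for n in range(26 ** k):
--         w = ""
--         m = n
--         for _ in range(k):
--             w = chr(ord('a') + m % 26) + w
--             m //= 26
--         if w not in subs:
--             return w
--     return ""
-- ===== Notes on version B (the rewrite author's own statement) =====
-- stated objective: alternative
-- what changed: A's 26-way recursive DFS over growing prefixes is replaced by a flat loop that enumerates the length-k candidates in lexicographic order as base-26 numbers 0,1,2,... (digit -> letter) and returns the first one not in the substring set.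
import Mathlib
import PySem

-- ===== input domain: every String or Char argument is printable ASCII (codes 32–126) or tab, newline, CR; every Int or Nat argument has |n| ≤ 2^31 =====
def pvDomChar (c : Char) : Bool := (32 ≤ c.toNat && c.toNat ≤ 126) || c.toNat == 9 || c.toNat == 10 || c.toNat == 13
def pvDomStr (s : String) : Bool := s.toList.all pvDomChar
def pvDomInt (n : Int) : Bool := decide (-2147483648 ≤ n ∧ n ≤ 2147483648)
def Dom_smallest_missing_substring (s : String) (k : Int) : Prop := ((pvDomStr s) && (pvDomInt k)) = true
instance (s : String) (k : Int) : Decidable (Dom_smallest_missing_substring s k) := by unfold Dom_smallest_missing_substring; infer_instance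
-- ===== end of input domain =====

-- B replaces A's 26-way recursive DFS by a lexicographic enumeration of the length-k
-- candidates as base-26 numbers 0, 1, 2, … with early exit (objective: alternative/idiomatic).

-- shared helper: both Pythons build the set of k-length substrings with the same loop
def pvSubs (cs : List Char) (k : Int) : PySem.Set (List Char) :=
  (PySem.List.pyRange 0 ((cs.length : Int) - k + 1) 1).foldl
    (fun st i => PySem.Set.add st (PySem.List.slice cs (some i) (some (i + k))))
    PySem.Set.empty

def pvAlpha : List Char := "abcdefghijklmnopqrstuvwxyz".toList

-- ===== PORT A =====
-- dfs(current, remaining): the for-loop with early return is List.findSome?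
def pvDfsA (subs : PySem.Set (List Char)) : List Char → Nat → Option (List Char)
  | cur, 0 => if PySem.Set.contains subs cur then none else some cur
  | cur, r + 1 => pvAlpha.findSome? (fun c => pvDfsA subs (cur ++ [c]) r)

def smallest_missing_substring (s : String) (k : Int) : String :=
  match pvDfsA (pvSubs s.toList k) [] k.toNat with
  | some w => String.ofList w        -- `result if result else ""` (String.ofList [] = "")
  | none => ""

-- ===== PORT B =====
-- the inner `for _ in range(k)` loop building w by prepending base-26 digits
def pvWord : List Char → Nat → Nat → List Char
  | w, _, 0 => w
  | w, m, j + 1 => pvWord (Char.ofNat (97 + m % 26) :: w) (m / 26) j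

-- the outer `for n in range(26 ** k)` loop with early return, as fuel recursion
def pvScanB (subs : PySem.Set (List Char)) (kn : Nat) : Nat → Nat → Option (List Char)
  | _, 0 => none
  | n, fuel + 1 =>
      if PySem.Set.contains subs (pvWord [] n kn) then pvScanB subs kn (n + 1) fuel
      else some (pvWord [] n kn)

def smallest_missing_substring_alt (s : String) (k : Int) : String :=
  match pvScanB (pvSubs s.toList k) k.toNat 0 (26 ^ k.toNat) with
  | some w => String.ofList w
  | none => ""

-- ===== PRECONDITION & SPEC =====
-- Pre_ excludes k < 0, where A's dfs never reaches remaining == 0 and the recursion raises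
-- RecursionError, and (conservatively, bound 950 < CPython's observed limit ≈ 996) large k,
-- where A's k-deep recursion also raises RecursionError under CPython's default limit.
def Pre_smallest_missing_substring (s : String) (k : Int) : Prop := 0 ≤ k ∧ k ≤ 950
instance (s : String) (k : Int) : Decidable (Pre_smallest_missing_substring s k) := by
  unfold Pre_smallest_missing_substring; infer_instance

def pvWitness_smallest_missing_substring : String × Int := ("abcab", 2)

def Spec_smallest_missing_substring (s : String) (k : Int) (out : String) : Prop := out = smallest_missing_substring_alt s k
instance (s : String) (k : Int) (out : String) : Decidable (Spec_smallest_missing_substring s k out) := by unfold Spec_smallest_missing_substring; infer_instance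

-- ===== CLAIM (what is proved, stated in full; the proofs are below) =====
def Claim_equal_smallest_missing_substring : Prop := ∀ (s : String) (k : Int), Dom_smallest_missing_substring s k → Pre_smallest_missing_substring s k → Spec_smallest_missing_substring s k (smallest_missing_substring s k)

-- ===== LEMMAS AND PROOFS =====

-- all length-r lowercase words in lexicographic order, built last-letter-innermost
def pvAllW : Nat → List (List Char)
  | 0 => [[]]
  | r + 1 => (pvAllW r).flatMap (fun w => pvAlpha.map (fun c => w ++ [c]))

theorem pvAlpha_eq : pvAlpha = (List.range 26).map (fun d => Char.ofNat (97 + d)) := by decide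

theorem find?_flatMap {α β : Type} (xs : List α) (f : α → List β) (p : β → Bool) :
    (xs.flatMap f).find? p = xs.findSome? (fun x => (f x).find? p) := by
  induction xs with
  | nil => rfl
  | cons x xs ih =>
      simp only [List.flatMap_cons, List.find?_append, List.findSome?_cons, ih]
      cases (f x).find? p <;> rfl

-- the first-letter-outermost recursion for pvAllW (the shape A's dfs follows)
theorem pvAllW_ms (r : Nat) :
    pvAllW (r + 1) = pvAlpha.flatMap (fun c => (pvAllW r).map (fun w => c :: w)) := by
  induction r with
  | zero => decide
  | succ r ih =>
      show (pvAllW (r + 1)).flatMap (fun w => pvAlpha.map (fun c => w ++ [c])) = _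
      conv_lhs => rw [ih]
      simp [pvAllW, List.flatMap_assoc, List.map_flatMap, List.flatMap_map, List.map_map,
            Function.comp_def]

theorem pvDfsA_eq (subs : PySem.Set (List Char)) (r : Nat) (p : List Char) :
    pvDfsA subs p r
      = ((pvAllW r).map (fun w => p ++ w)).find? (fun w => !PySem.Set.contains subs w) := by
  induction r generalizing p with
  | zero =>
      simp only [pvDfsA, pvAllW, List.map_cons, List.map_nil, List.append_nil, List.find?]
      cases h : PySem.Set.contains subs p <;> simp [h]
  | succ r ih =>
      rw [pvAllW_ms, List.map_flatMap, find?_flatMap]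
      show pvAlpha.findSome? _ = pvAlpha.findSome? _
      congr 1
      funext c
      rw [ih]
      congr 1
      simp [List.map_map, Function.comp_def]

theorem pvWord_append (r : Nat) : ∀ (m : Nat) (w : List Char),
    pvWord w m r = pvWord [] m r ++ w := by
  induction r with
  | zero => intro m w; rfl
  | succ r ih =>
      intro m w
      show pvWord (Char.ofNat (97 + m % 26) :: w) (m / 26) r
        = pvWord [Char.ofNat (97 + m % 26)] (m / 26) r ++ w
      rw [ih (m / 26) (Char.ofNat (97 + m % 26) :: w), ih (m / 26) [Char.ofNat (97 + m % 26)]]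
      simp

theorem range_mul_flatMap (a b : Nat) :
    List.range (a * b) = (List.range a).flatMap (fun q => (List.range b).map (fun d => b * q + d)) := by
  induction a with
  | zero => simp
  | succ a ih =>
      rw [Nat.succ_mul, List.range_add, ih, List.range_succ, List.flatMap_append]
      simp [Nat.mul_comm]

theorem range_map_pvWord (r : Nat) :
    (List.range (26 ^ r)).map (fun m => pvWord [] m r) = pvAllW r := by
  induction r with
  | zero => decide
  | succ r ih =>
      rw [pow_succ, range_mul_flatMap, List.map_flatMap]
      show List.flatMap _ _ = (pvAllW r).flatMap _
      rw [← ih, List.flatMap_map]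
      refine List.flatMap_congr (fun q hq => ?_)
      rw [List.map_map]
      simp only [Function.comp_def]
      rw [pvAlpha_eq, List.map_map]
      refine List.map_congr_left (fun d hd => ?_)
      have hd26 : d < 26 := List.mem_range.mp hd
      simp only [Function.comp_def]
      show pvWord [Char.ofNat (97 + (26 * q + d) % 26)] ((26 * q + d) / 26) r
        = pvWord [] q r ++ [Char.ofNat (97 + d)]
      have h1 : (26 * q + d) % 26 = d := by omega
      have h2 : (26 * q + d) / 26 = q := by omega
      rw [h1, h2, pvWord_append]

theorem pvScanB_eq (subs : PySem.Set (List Char)) (kn : Nat) :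
    ∀ (fuel n : Nat),
      pvScanB subs kn n fuel
        = ((List.range' n fuel).map (fun m => pvWord [] m kn)).find?
            (fun w => !PySem.Set.contains subs w) := by
  intro fuel
  induction fuel with
  | zero => intro n; rfl
  | succ fuel ih =>
      intro n
      rw [List.range'_succ, List.map_cons]
      show (if PySem.Set.contains subs (pvWord [] n kn) then pvScanB subs kn (n + 1) fuel
            else some (pvWord [] n kn)) = _
      by_cases hm : pvWord [] n kn ∈ subs
      · rw [if_pos (by simp [hm]), ih, List.find?_cons_of_neg (by simp [hm])]
      · rw [if_neg (by simp [hm]), List.find?_cons_of_pos (by simp [hm])]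

theorem pvSearch_eq (subs : PySem.Set (List Char)) (kn : Nat) :
    pvDfsA subs [] kn = pvScanB subs kn 0 (26 ^ kn) := by
  rw [pvDfsA_eq, pvScanB_eq, ← List.range_eq_range', range_map_pvWord]
  simp

-- ===== VERDICT (by name: the statement is the Claim_ definition above) =====
theorem smallest_missing_substring_spec : Claim_equal_smallest_missing_substring := by
  intro s k _ _
  unfold Spec_smallest_missing_substring smallest_missing_substring smallest_missing_substring_alt
  rw [pvSearch_eq]
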